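-- pv_equiv track=rewrite | github.com/wtf-tupak/ai-mindset-org | skills/business-analyst-toolkit/scripts/raci_generator.py | _calculate_role_summary
-- ===== SOURCE A (Python) =====
-- from typing import Dict, List, Optional, Tuple, Set
--
-- VALID_RACI_CODES = {'R', 'A', 'C', 'I'}
--
-- def _calculate_role_summary(raci_matrix: List[Dict], roles: List[str]) -> Dict[str, Dict[str, int]]:
--     """Calculate summary statistics for each role"""
--     summary = {role: {'R': 0, 'A': 0, 'C': 0, 'I': 0, 'total': 0} for role in roles}
--
--     for entry in raci_matrix:
--         for role, code in entry['roles'].items():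
--             if code in VALID_RACI_CODES:
--                 summary[role][code] += 1
--                 summary[role]['total'] += 1
--
--     return summary
-- ===== SOURCE B (Python) =====
-- # B: declarative per-role/per-code counting (comprehension counts) instead of threading a
-- # mutable summary table through the matrix scan; alternative decomposition, not faster.
-- VALID_RACI_CODES = {'R', 'A', 'C', 'I'}
--
--
-- def _calculate_role_summary(raci_matrix, roles):
--     """Calculate summary statistics for each role"""
--     def count(role, code):
--         return sum(1 for entry in raci_matrix if entry['roles'].get(role) == code)
--
--     summary = {}
--     for role in roles:
--         r = count(role, 'R')
--         a = count(role, 'A')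
--         c = count(role, 'C')
--         i = count(role, 'I')
--         summary[role] = {'R': r, 'A': a, 'C': c, 'I': i, 'total': r + a + c + i}
--     return summary
-- ===== Notes on version B (the rewrite author's own statement) =====
-- stated objective: alternative
-- what changed: B computes each (role, code) cell independently as a declarative comprehension count over the matrix and assembles each role's row at once, instead of threading a pre-initialized mutable summary table through an entry-by-entry scan that increments cells in place.
import Mathlib
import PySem

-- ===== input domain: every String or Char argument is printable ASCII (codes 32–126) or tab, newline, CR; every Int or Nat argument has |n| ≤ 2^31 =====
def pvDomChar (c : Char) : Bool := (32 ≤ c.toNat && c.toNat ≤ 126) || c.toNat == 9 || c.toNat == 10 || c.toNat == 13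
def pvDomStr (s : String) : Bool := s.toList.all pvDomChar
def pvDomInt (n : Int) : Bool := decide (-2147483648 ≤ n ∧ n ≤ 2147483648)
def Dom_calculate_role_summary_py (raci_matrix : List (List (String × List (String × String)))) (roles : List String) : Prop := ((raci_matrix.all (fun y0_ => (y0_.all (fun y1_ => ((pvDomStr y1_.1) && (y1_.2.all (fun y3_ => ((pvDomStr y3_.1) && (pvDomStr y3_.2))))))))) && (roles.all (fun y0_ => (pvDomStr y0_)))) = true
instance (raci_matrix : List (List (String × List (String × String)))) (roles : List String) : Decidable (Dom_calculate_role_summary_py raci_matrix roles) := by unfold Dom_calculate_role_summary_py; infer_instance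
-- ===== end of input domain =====

-- B replaces A's mutable summary table (initialized, then incremented in place while scanning
-- entry by entry) with independent per-(role, code) comprehension counts over the matrix;
-- alternative decomposition of the same computation, no speed claim.

-- ===== PORT A =====
-- entry['roles'] : first-match lookup in the entry association list (Python dict access)
def pvRolesOf (entry : List (String × List (String × String))) : List (String × String) :=
  (PySem.Dict.mk entry).getD "roles" []

-- VALID_RACI_CODES = {'R', 'A', 'C', 'I'}
def pvValidCodes : PySem.Set String := PySem.Set.ofList ["R", "A", "C", "I"]

-- {'R': 0, 'A': 0, 'C': 0, 'I': 0, 'total': 0}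
def pvInit : PySem.Dict String Int :=
  PySem.Dict.mk [("R", 0), ("A", 0), ("C", 0), ("I", 0), ("total", 0)]

-- body of the inner loop: if code in VALID_RACI_CODES: summary[role][code] += 1; summary[role]['total'] += 1
def pvStep (d : PySem.Dict String (PySem.Dict String Int)) (rc : String × String) :
    PySem.Dict String (PySem.Dict String Int) :=
  if PySem.Set.contains pvValidCodes rc.2 then
    ((d.modify rc.1 PySem.Dict.empty (fun inner => inner.modify rc.2 0 (· + 1))).modify
      rc.1 PySem.Dict.empty (fun inner => inner.modify "total" 0 (· + 1)))
  else d

def calculate_role_summary_py (raci_matrix : List (List (String × List (String × String)))) (roles : List String) : List (String × List (String × Int)) :=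
  let summary0 : PySem.Dict String (PySem.Dict String Int) :=
    roles.foldl (fun d role => d.insert role pvInit) PySem.Dict.empty
  let summary :=
    raci_matrix.foldl (fun d entry => (pvRolesOf entry).foldl pvStep d) summary0
  summary.items.map (fun p => (p.1, p.2.items))

-- ===== PORT B =====
-- count(role, code) = sum(1 for entry in raci_matrix if entry['roles'].get(role) == code)
def pvCount (raci_matrix : List (List (String × List (String × String)))) (role code : String) : Int :=
  raci_matrix.foldl
    (fun acc entry =>
      if (PySem.Dict.mk (pvRolesOf entry)).get? role == some code then acc + 1 else acc) 0

-- {'R': r, 'A': a, 'C': c, 'I': i, 'total': r + a + c + i}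
def pvRow (raci_matrix : List (List (String × List (String × String)))) (role : String) :
    PySem.Dict String Int :=
  let r := pvCount raci_matrix role "R"
  let a := pvCount raci_matrix role "A"
  let c := pvCount raci_matrix role "C"
  let i := pvCount raci_matrix role "I"
  PySem.Dict.mk [("R", r), ("A", a), ("C", c), ("I", i), ("total", r + a + c + i)]

def calculate_role_summary_py_alt (raci_matrix : List (List (String × List (String × String)))) (roles : List String) : List (String × List (String × Int)) :=
  let summary : PySem.Dict String (PySem.Dict String Int) :=
    roles.foldl (fun d role => d.insert role (pvRow raci_matrix role)) PySem.Dict.empty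
  summary.items.map (fun p => (p.1, p.2.items))

-- ===== PRECONDITION & SPEC =====
-- Pre_ excludes association lists with duplicate keys (they do not encode Python dicts) and the
-- inputs on which A raises KeyError: an entry without a 'roles' key, or an entry assigning a
-- valid RACI code to a role that is not in `roles`.
def Pre_calculate_role_summary_py (raci_matrix : List (List (String × List (String × String)))) (roles : List String) : Prop :=
  ∀ entry ∈ raci_matrix,
    ("roles" ∈ entry.map Prod.fst) ∧ (entry.map Prod.fst).Nodup ∧
    ∀ rv ∈ entry, (rv.2.map Prod.fst).Nodup ∧
      (rv.1 = "roles" → ∀ rc ∈ rv.2, rc.2 ∈ (["R", "A", "C", "I"] : List String) → rc.1 ∈ roles)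
instance (raci_matrix : List (List (String × List (String × String)))) (roles : List String) : Decidable (Pre_calculate_role_summary_py raci_matrix roles) := by unfold Pre_calculate_role_summary_py; infer_instance

def pvWitness_calculate_role_summary_py : (List (List (String × List (String × String)))) × List String :=
  ([[("roles", [("alice", "R"), ("bob", "C")])], [("roles", [("alice", "A")])]], ["alice", "bob", "carol"])

def Spec_calculate_role_summary_py (raci_matrix : List (List (String × List (String × String)))) (roles : List String) (out : List (String × List (String × Int))) : Prop := out = calculate_role_summary_py_alt raci_matrix roles
instance (raci_matrix : List (List (String × List (String × String)))) (roles : List String) (out : List (String × List (String × Int))) : Decidable (Spec_calculate_role_summary_py raci_matrix roles out) := by unfold Spec_calculate_role_summary_py; infer_instance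

-- ===== CLAIM (what is proved, stated in full; the proofs are below) =====
def Claim_equal_calculate_role_summary_py : Prop := ∀ (raci_matrix : List (List (String × List (String × String)))) (roles : List String), Dom_calculate_role_summary_py raci_matrix roles → Pre_calculate_role_summary_py raci_matrix roles → Spec_calculate_role_summary_py raci_matrix roles (calculate_role_summary_py raci_matrix roles)


-- ===== LEMMAS AND PROOFS =====

-- the inner-row update applied by a valid (role, code) item
def pvUpd (inner : PySem.Dict String Int) (c : String) : PySem.Dict String Int :=
  (inner.modify c 0 (· + 1)).modify "total" 0 (· + 1)

-- A's nested matrix/entry loop is the flat loop over all (role, code) items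
theorem pv_foldl_flat (m : List (List (String × List (String × String))))
    (d : PySem.Dict String (PySem.Dict String Int)) :
    m.foldl (fun d entry => (pvRolesOf entry).foldl pvStep d) d
      = (m.flatMap pvRolesOf).foldl pvStep d := by
  induction m generalizing d with
  | nil => rfl
  | cons e m ih => simp [List.flatMap_cons, List.foldl_append, ih]

-- a fold of inserts whose value depends only on the key: lookup
theorem pv_get?_foldl_insert {ν : Type} (v : String → ν) :
    ∀ (rs : List String) (d : PySem.Dict String ν) (r : String),
    (rs.foldl (fun d role => d.insert role (v role)) d).get? r
      = if r ∈ rs then some (v r) else d.get? r := by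
  intro rs
  induction rs with
  | nil => intro d r; simp
  | cons x xs ih =>
    intro d r
    by_cases hx : r ∈ xs
    · simp [List.foldl_cons, ih, hx]
    · by_cases hrx : r = x
      · subst hrx
        simp [List.foldl_cons, ih, hx, PySem.Dict.get?_insert_self]
      · simp [List.foldl_cons, ih, hx, PySem.Dict.get?_insert_of_ne _ _ hrx, hrx]

-- keys of a fold of inserts from empty
theorem pv_keys_foldl_insert {ν : Type} (v : String → ν) (rs : List String) :
    (rs.foldl (fun d role => d.insert role (v role)) PySem.Dict.empty).keys
      = PySem.Set.ofList rs := by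
  rw [PySem.Dict.keys_foldl_insert]
  simp [PySem.Set.update_nil_left]

-- modify at an existing key leaves the key list unchanged
theorem pv_keys_modify_mem {ν : Type} (d : PySem.Dict String ν) (k : String) (d0 : ν)
    (f : ν → ν) (h : k ∈ d.keys) : (d.modify k d0 f).keys = d.keys := by
  have hc : d.contains k = true := (PySem.Dict.contains_iff_mem_keys d k).2 h
  simp [PySem.Dict.keys_modify, PySem.Dict.keys_insert_of_contains, hc]

-- pvStep preserves the key list when the touched role is already a key
theorem pv_keys_foldl_step (L : List (String × String))
    (d : PySem.Dict String (PySem.Dict String Int))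
    (h : ∀ p ∈ L, PySem.Set.contains pvValidCodes p.2 = true → p.1 ∈ d.keys) :
    (L.foldl pvStep d).keys = d.keys := by
  induction L generalizing d with
  | nil => rfl
  | cons p L ih =>
    rw [List.foldl_cons]
    by_cases hv : PySem.Set.contains pvValidCodes p.2 = true
    · have hk : p.1 ∈ d.keys := h p (List.mem_cons_self) hv
      have hk1 : (d.modify p.1 PySem.Dict.empty
          (fun inner => inner.modify p.2 0 (· + 1))).keys = d.keys :=
        pv_keys_modify_mem _ _ _ _ hk
      have hstep : (pvStep d p).keys = d.keys := by
        rw [pvStep, if_pos hv, pv_keys_modify_mem _ _ _ _ (by rw [hk1]; exact hk), hk1]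
      rw [ih _ (fun q hq hvq => by rw [hstep]; exact h q (List.mem_cons_of_mem _ hq) hvq), hstep]
    · rw [pvStep, if_neg hv]
      exact ih _ (fun q hq hvq => h q (List.mem_cons_of_mem _ hq) hvq)

-- row extraction: folding pvStep only changes the row of the touched role
theorem pv_getD_foldl_step (r : String) :
    ∀ (L : List (String × String)) (d : PySem.Dict String (PySem.Dict String Int)),
    (L.foldl pvStep d).getD r PySem.Dict.empty
      = ((L.filter (fun p => p.1 == r && PySem.Set.contains pvValidCodes p.2)).map Prod.snd).foldl
          pvUpd (d.getD r PySem.Dict.empty) := by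
  intro L
  induction L with
  | nil => intro d; rfl
  | cons p L ih =>
    intro d
    rw [List.foldl_cons, List.filter_cons]
    by_cases hv : PySem.Set.contains pvValidCodes p.2 = true
    · by_cases hp : p.1 = r
      · have hstep : (pvStep d p).getD r PySem.Dict.empty
            = pvUpd (d.getD r PySem.Dict.empty) p.2 := by
          rw [pvStep, if_pos hv, hp, PySem.Dict.getD_modify_self, PySem.Dict.getD_modify_self,
            pvUpd]
        simp only [hp, hv, BEq.rfl, Bool.and_self, if_true, List.map_cons, List.foldl_cons]
        rw [ih, hstep]
      · have hstep : (pvStep d p).getD r PySem.Dict.empty = d.getD r PySem.Dict.empty := by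
          rw [pvStep, if_pos hv, PySem.Dict.getD_modify_of_ne, PySem.Dict.getD_modify_of_ne]
          · exact fun h => hp h.symm
          · exact fun h => hp h.symm
        have hfilt : (p.1 == r && PySem.Set.contains pvValidCodes p.2) = false := by
          simp [hp]
        simp only [hfilt, Bool.false_eq_true, if_false]
        rw [ih, hstep]
    · have hv' : PySem.Set.contains pvValidCodes p.2 = false := by
        simpa using hv
      have hfilt : (p.1 == r && PySem.Set.contains pvValidCodes p.2) = false := by
        rw [hv', Bool.and_false]
      simp only [hfilt, Bool.false_eq_true, if_false]
      rw [pvStep, if_neg hv]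
      exact ih d

-- closed form of the row after a list of valid codes
theorem pv_row_closed :
    ∀ (cs : List String) (a b c i t : Int), (∀ x ∈ cs, x ∈ (["R", "A", "C", "I"] : List String)) →
    cs.foldl pvUpd (PySem.Dict.mk [("R", a), ("A", b), ("C", c), ("I", i), ("total", t)])
      = PySem.Dict.mk [("R", a + cs.count "R"), ("A", b + cs.count "A"),
          ("C", c + cs.count "C"), ("I", i + cs.count "I"), ("total", t + (cs.length : Int))] := by
  intro cs
  induction cs with
  | nil => intro a b c i t _; simp
  | cons x cs ih =>
    intro a b c i t h
    have hx : x = "R" ∨ x = "A" ∨ x = "C" ∨ x = "I" := by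
      simpa using h x List.mem_cons_self
    have hcs : ∀ y ∈ cs, y ∈ (["R", "A", "C", "I"] : List String) :=
      fun y hy => h y (List.mem_cons_of_mem _ hy)
    rw [List.foldl_cons]
    rcases hx with h1 | h1 | h1 | h1 <;> subst h1
    · rw [show pvUpd (PySem.Dict.mk [("R", a), ("A", b), ("C", c), ("I", i), ("total", t)]) "R"
          = PySem.Dict.mk [("R", a + 1), ("A", b), ("C", c), ("I", i), ("total", t + 1)] from by
            simp [pvUpd, PySem.Dict.modify, PySem.Dict.getD, PySem.Dict.get?, PySem.Dict.insert],
        ih _ _ _ _ _ hcs]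
      simp
      omega
    · rw [show pvUpd (PySem.Dict.mk [("R", a), ("A", b), ("C", c), ("I", i), ("total", t)]) "A"
          = PySem.Dict.mk [("R", a), ("A", b + 1), ("C", c), ("I", i), ("total", t + 1)] from by
            simp [pvUpd, PySem.Dict.modify, PySem.Dict.getD, PySem.Dict.get?, PySem.Dict.insert],
        ih _ _ _ _ _ hcs]
      simp
      omega
    · rw [show pvUpd (PySem.Dict.mk [("R", a), ("A", b), ("C", c), ("I", i), ("total", t)]) "C"
          = PySem.Dict.mk [("R", a), ("A", b), ("C", c + 1), ("I", i), ("total", t + 1)] from by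
            simp [pvUpd, PySem.Dict.modify, PySem.Dict.getD, PySem.Dict.get?, PySem.Dict.insert],
        ih _ _ _ _ _ hcs]
      simp
      omega
    · rw [show pvUpd (PySem.Dict.mk [("R", a), ("A", b), ("C", c), ("I", i), ("total", t)]) "I"
          = PySem.Dict.mk [("R", a), ("A", b), ("C", c), ("I", i + 1), ("total", t + 1)] from by
            simp [pvUpd, PySem.Dict.modify, PySem.Dict.getD, PySem.Dict.get?, PySem.Dict.insert],
        ih _ _ _ _ _ hcs]
      simp
      omega

-- all elements valid: length is the sum of the four code counts
theorem pv_len_eq_counts (cs : List String) (h : ∀ x ∈ cs, x ∈ (["R", "A", "C", "I"] : List String)) :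
    (cs.length : Int) = (cs.count "R" : Int) + cs.count "A" + cs.count "C" + cs.count "I" := by
  revert h
  induction cs with
  | nil => intro _; simp
  | cons y cs ih =>
    intro h
    have hy : y = "R" ∨ y = "A" ∨ y = "C" ∨ y = "I" := by
      simpa using h y List.mem_cons_self
    have ih' := ih (fun z hz => h z (List.mem_cons_of_mem _ hz))
    rcases hy with h1 | h1 | h1 | h1 <;> subst h1 <;>
      simp only [List.count_cons, List.length_cons] <;> simp <;> omega

-- counting a code among the valid items of role r = counting the pair (r, x)
theorem pv_count_filter (k x : String) (hx : PySem.Set.contains pvValidCodes x = true) :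
    ∀ (L : List (String × String)),
    ((L.filter (fun p => p.1 == k && PySem.Set.contains pvValidCodes p.2)).map Prod.snd).count x
      = L.count (k, x) := by
  intro L
  induction L with
  | nil => rfl
  | cons p L ih =>
    rcases p with ⟨a, b⟩
    rw [List.filter_cons]
    by_cases h1 : a = k
    · subst h1
      by_cases hv : PySem.Set.contains pvValidCodes b = true
      · have hcond : ((a, b).1 == a && PySem.Set.contains pvValidCodes (a, b).2) = true := by
          rw [hv]; simp
        rw [hcond, if_pos rfl, List.map_cons, List.count_cons, List.count_cons, ih]
        by_cases h2 : b = x <;> simp [h2, Prod.ext_iff]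
      · have h2 : b ≠ x := fun e => hv (e ▸ hx)
        have hv' : PySem.Set.contains pvValidCodes b = false := by simpa using hv
        have hcond : ((a, b).1 == a && PySem.Set.contains pvValidCodes (a, b).2) = false := by
          rw [hv', Bool.and_false]
        rw [hcond]
        simp only [Bool.false_eq_true, if_false]
        rw [ih, List.count_cons]
        simp [Prod.ext_iff, h2]
    · have hcond : ((a, b).1 == k && PySem.Set.contains pvValidCodes (a, b).2) = false := by
        simp [h1]
      rw [hcond]
      simp only [Bool.false_eq_true, if_false]
      rw [ih, List.count_cons]
      simp [Prod.ext_iff, h1]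

-- in an association list with distinct keys, pair count = lookup test
theorem pv_count_lookup (k x : String) :
    ∀ (l : List (String × String)), (l.map Prod.fst).Nodup →
    (l.count (k, x) : Int) = (if (PySem.Dict.mk l).get? k == some x then (1 : Int) else 0) := by
  intro l
  induction l with
  | nil => intro _; simp [PySem.Dict.get?]
  | cons p l ih =>
    intro hnd
    rcases p with ⟨a, b⟩
    rw [List.map_cons, List.nodup_cons] at hnd
    rw [PySem.Dict.get?_mk_cons]
    by_cases hak : a = k
    · subst hak
      have hz : l.count (a, x) = 0 := by
        rw [List.count_eq_zero]
        intro hmem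
        exact hnd.1 (List.mem_map.2 ⟨(a, x), hmem, rfl⟩)
      by_cases hbx : b = x <;>
        simp [hz, hbx, Prod.ext_iff]
    · have hne : (a, b) ≠ (k, x) := by simp [Prod.ext_iff, hak]
      have hbeq : (a == k) = false := by simp [hak]
      simp only [List.count_cons, hbeq, Bool.false_eq_true, if_false]
      rw [← ih hnd.2]
      simp [hne]

-- B's comprehension count = pair count over the flattened items
theorem pv_pvCount_eq (k x : String) (m : List (List (String × List (String × String))))
    (h : ∀ entry ∈ m, ((pvRolesOf entry).map Prod.fst).Nodup) :
    pvCount m k x = ((m.flatMap pvRolesOf).count (k, x) : Int) := by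
  have aux : ∀ (m : List (List (String × List (String × String)))) (acc : Int),
      (∀ entry ∈ m, ((pvRolesOf entry).map Prod.fst).Nodup) →
      m.foldl (fun acc entry =>
          if (PySem.Dict.mk (pvRolesOf entry)).get? k == some x then acc + 1 else acc) acc
        = acc + ((m.flatMap pvRolesOf).count (k, x) : Int) := by
    intro m
    induction m with
    | nil => intro acc _; simp
    | cons e m ih =>
      intro acc h
      rw [List.foldl_cons, ih _ (fun e' he' => h e' (List.mem_cons_of_mem _ he')),
        List.flatMap_cons, List.count_append]
      have hcl := pv_count_lookup k x (pvRolesOf e) (h e List.mem_cons_self)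
      push_cast
      by_cases hc : ((PySem.Dict.mk (pvRolesOf e)).get? k == some x) = true
      · rw [if_pos hc] at hcl ⊢; omega
      · rw [if_neg hc] at hcl ⊢; omega
  rw [pvCount, aux m 0 h, zero_add]


-- ===== VERDICT (by name: the statement is the Claim_ definition above) =====
-- what Pre_ guarantees about the extracted 'roles' value of each entry
theorem pv_pre_rolesOf (m : List (List (String × List (String × String)))) (roles : List String)
    (hpre : Pre_calculate_role_summary_py m roles) :
    ∀ entry ∈ m, ((pvRolesOf entry).map Prod.fst).Nodup ∧
      (∀ rc ∈ pvRolesOf entry, rc.2 ∈ (["R", "A", "C", "I"] : List String) → rc.1 ∈ roles) := by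
  intro e he
  obtain ⟨-, -, hall⟩ := hpre e he
  rw [pvRolesOf]
  cases hq : (PySem.Dict.mk e).get? "roles" with
  | none =>
    rw [PySem.Dict.getD_of_get?_eq_none _ _ hq]
    exact ⟨List.nodup_nil, by intro rc hrc; cases hrc⟩
  | some v =>
    rw [PySem.Dict.getD_of_get?_eq_some _ _ hq]
    have hv : ("roles", v) ∈ e := PySem.Dict.mem_items_of_get?_eq_some _ hq
    obtain ⟨hnd, himp⟩ := hall ("roles", v) hv
    exact ⟨hnd, himp rfl⟩

theorem calculate_role_summary_py_spec : Claim_equal_calculate_role_summary_py := by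
  intro m roles _ hpre
  unfold Spec_calculate_role_summary_py
  have hro := pv_pre_rolesOf m roles hpre
  rw [calculate_role_summary_py, calculate_role_summary_py_alt]
  have hRACI : ∀ x : String, PySem.Set.contains pvValidCodes x = true ↔
      x ∈ (["R", "A", "C", "I"] : List String) := by
    intro x
    simp [pvValidCodes, PySem.Set.mem_ofList]
  -- the two summary dictionaries
  set s0 := List.foldl (fun d role => d.insert role pvInit) PySem.Dict.empty roles with hs0
  set bsum := List.foldl (fun d role => d.insert role (pvRow m role)) PySem.Dict.empty roles
    with hbsum
  have hkeys0 : s0.keys = PySem.Set.ofList roles := pv_keys_foldl_insert (fun _ => pvInit) roles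
  have hkeysB : bsum.keys = PySem.Set.ofList roles := pv_keys_foldl_insert (pvRow m) roles
  rw [pv_foldl_flat m s0]
  set flat := m.flatMap pvRolesOf with hflat
  have hmemflat : ∀ p ∈ flat, PySem.Set.contains pvValidCodes p.2 = true → p.1 ∈ s0.keys := by
    intro p hp hv
    obtain ⟨e, he, hpe⟩ := List.mem_flatMap.1 hp
    have : p.1 ∈ roles := (hro e he).2 p hpe ((hRACI p.2).1 hv)
    rw [hkeys0]
    exact (PySem.Set.mem_ofList _ _).2 this
  set final := flat.foldl pvStep s0 with hfinal
  have hkeysF : final.keys = PySem.Set.ofList roles := by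
    rw [hfinal, pv_keys_foldl_step flat s0 hmemflat, hkeys0]
  have hndF : final.keys.Nodup := by rw [hkeysF]; exact PySem.Set.nodup_ofList _
  have hndB : bsum.keys.Nodup := by rw [hkeysB]; exact PySem.Set.nodup_ofList _
  rw [PySem.Dict.items_eq_map_keys final hndF PySem.Dict.empty,
    PySem.Dict.items_eq_map_keys bsum hndB PySem.Dict.empty, hkeysF, hkeysB]
  rw [List.map_map, List.map_map]
  refine List.map_congr_left ?_
  intro r hr
  have hr' : r ∈ roles := (PySem.Set.mem_ofList _ _).1 hr
  -- B's row
  have hgetB : bsum.getD r PySem.Dict.empty = pvRow m r := by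
    refine PySem.Dict.getD_of_get?_eq_some _ _ ?_
    rw [hbsum, pv_get?_foldl_insert (pvRow m) roles, if_pos hr']
  -- A's row
  have hget0 : s0.getD r PySem.Dict.empty = pvInit := by
    refine PySem.Dict.getD_of_get?_eq_some _ _ ?_
    rw [hs0, pv_get?_foldl_insert (fun _ => pvInit) roles, if_pos hr']
  set cs := (flat.filter (fun p => p.1 == r && PySem.Set.contains pvValidCodes p.2)).map Prod.snd
    with hcs
  have hcsv : ∀ x ∈ cs, x ∈ (["R", "A", "C", "I"] : List String) := by
    intro x hxc
    obtain ⟨p, hpf, hpx⟩ := List.mem_map.1 hxc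
    have := (List.mem_filter.1 hpf).2
    rw [← hpx]
    exact (hRACI p.2).1 (by
      cases h2 : PySem.Set.contains pvValidCodes p.2
      · rw [h2, Bool.and_false] at this; cases this
      · rfl)
  have hgetF : final.getD r PySem.Dict.empty
      = PySem.Dict.mk [("R", (0 : Int) + cs.count "R"), ("A", (0 : Int) + cs.count "A"),
          ("C", (0 : Int) + cs.count "C"), ("I", (0 : Int) + cs.count "I"),
          ("total", (0 : Int) + (cs.length : Int))] := by
    rw [hfinal, pv_getD_foldl_step r flat s0, hget0, ← hcs, pvInit,
      pv_row_closed cs 0 0 0 0 0 hcsv]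
  -- identify the counts with B's comprehension counts
  have hnods : ∀ entry ∈ m, ((pvRolesOf entry).map Prod.fst).Nodup := fun e he => (hro e he).1
  have hcnt : ∀ x : String, PySem.Set.contains pvValidCodes x = true →
      (cs.count x : Int) = pvCount m r x := by
    intro x hx
    rw [hcs, pv_count_filter r x hx flat, hflat, ← pv_pvCount_eq r x m hnods]
  have hR := hcnt "R" (by decide)
  have hA := hcnt "A" (by decide)
  have hC := hcnt "C" (by decide)
  have hI := hcnt "I" (by decide)
  have hT : (cs.length : Int) = pvCount m r "R" + pvCount m r "A" + pvCount m r "C"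
      + pvCount m r "I" := by
    rw [pv_len_eq_counts cs hcsv, hR, hA, hC, hI]
  simp only [Function.comp_apply, hgetF, hgetB, pvRow]
  rw [hR, hA, hC, hI, hT]
  norm_num
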